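-- pv_equiv track=rewrite | github.com/karina-cherednyk/Information-Retrieval-Model | Cherednyk_05_v0/converter/vocab_converter.py | strFromBlock
-- ===== SOURCE A (Python) =====
-- def strFromBlock(block):
--     m_len = min(map(len, block))
--     common_i = -1
--     first = block[0]
--     for i in range(m_len):
--         if not all(term[i] == first[i] for term in block):
--             break
--         else:
--             common_i = i
--     if common_i is not -1:
--         res_str = str(len(first[:common_i + 1])) + first[:common_i + 1]
--     else:
--         res_str = '0'
--     for term in block:
--         sub = term[common_i + 1:]
--         res_str += str(len(sub)) + sub
--     return res_str
-- ===== SOURCE B (Python) =====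
-- def _lcp(a, b):
--     out = []
--     for x, y in zip(a, b):
--         if x != y:
--             break
--         out.append(x)
--     return ''.join(out)
--
--
-- def strFromBlock(block):
--     pre = block[0]
--     for term in block:
--         pre = _lcp(pre, term)
--     p = len(pre)
--     res = (str(p) + pre) if p else '0'
--     return res + ''.join(str(len(t[p:])) + t[p:] for t in block)
-- ===== Notes on version B (the rewrite author's own statement) =====
-- stated objective: alternative
-- what changed: Replaces A's per-position scan (which tests all terms at each index i with an all(...) generator and breaks at the first mismatch) by a single per-term fold that shrinks a running common-prefix string via pairwise LCP, then emits the suffixes with one join instead of repeated string +=.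
-- outside the precondition, e.g. on strFromBlock([]): A raises ValueError, B raises IndexError
import Mathlib
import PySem

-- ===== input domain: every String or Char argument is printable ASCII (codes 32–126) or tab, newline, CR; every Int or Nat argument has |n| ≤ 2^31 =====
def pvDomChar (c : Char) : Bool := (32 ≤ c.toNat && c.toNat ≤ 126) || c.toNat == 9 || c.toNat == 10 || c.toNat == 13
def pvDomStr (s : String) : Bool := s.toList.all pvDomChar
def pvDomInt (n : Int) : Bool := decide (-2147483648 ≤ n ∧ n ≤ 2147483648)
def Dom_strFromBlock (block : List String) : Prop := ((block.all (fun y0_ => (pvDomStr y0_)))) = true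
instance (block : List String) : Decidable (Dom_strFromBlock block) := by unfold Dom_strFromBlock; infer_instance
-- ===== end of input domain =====

-- B replaces A's per-position all-terms scan with a per-term fold of pairwise common prefixes
-- and a join of the suffixes (objective: alternative decomposition, same asymptotic cost).


-- ===== PORT A =====
-- the 'for i in range(m_len): if not all(term[i]==first[i] ...): break else common_i = i' loop
def strA_loop (terms : List (List Char)) (first : List Char) : Nat → Nat → Int → Int
  | 0, _, ci => ci
  | fuel+1, i, ci =>
    if terms.all (fun t => t[i]? == first[i]?) then
      strA_loop terms first fuel (i+1) (i : Int)
    else ci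

def strFromBlock (block : List String) : String :=
  let terms := block.map String.toList
  -- m_len = min(map(len, block)); min([]) raises ValueError → none, excluded by Pre_
  match PySem.List.min? (terms.map (fun t => (t.length : Int))) (fun x => x) with
  | none => ""
  | some mlen =>
    let first := terms.headD []        -- block[0]; block nonempty under Pre_
    let ci := strA_loop terms first mlen.toNat 0 (-1)
    -- first[:common_i+1] with common_i+1 ≥ 0 is take
    let res := if ci ≠ -1 then
        PySem.Int.toChars ((first.take (ci+1).toNat).length : Int) ++ first.take (ci+1).toNat
      else ['0']
    String.ofList (terms.foldl (fun r t =>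
      r ++ PySem.Int.toChars ((t.drop (ci+1).toNat).length : Int) ++ t.drop (ci+1).toNat) res)

-- ===== PORT B =====
-- _lcp(a,b): loop over zip with break, collecting matching chars
def lcp2 (a b : List Char) : List Char :=
  match a, b with
  | x :: as_, y :: bs => if x = y then x :: lcp2 as_ bs else []
  | _, _ => []

def strFromBlock_alt (block : List String) : String :=
  match block with
  | [] => ""                            -- block[0] raises IndexError; excluded by Pre_
  | f :: _ =>
    let terms := block.map String.toList
    let pre := terms.foldl lcp2 f.toList
    let p := pre.length
    let head := if p ≠ 0 then PySem.Int.toChars (p : Int) ++ pre else ['0']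
    String.ofList (head ++ (terms.map (fun t => PySem.Int.toChars ((t.drop p).length : Int) ++ t.drop p)).flatten)

-- ===== PRECONDITION & SPEC =====
-- Pre_ excludes only the empty list, on which A raises ValueError (min of an empty sequence).
def Pre_strFromBlock (block : List String) : Prop := block ≠ []
instance (block : List String) : Decidable (Pre_strFromBlock block) := by unfold Pre_strFromBlock; infer_instance
def pvWitness_strFromBlock : List String := ["abc", "abd"]

def Spec_strFromBlock (block : List String) (out : String) : Prop := out = strFromBlock_alt block
instance (block : List String) (out : String) : Decidable (Spec_strFromBlock block out) := by unfold Spec_strFromBlock; infer_instance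

-- ===== CLAIM (what is proved, stated in full; the proofs are below) =====
def Claim_equal_strFromBlock : Prop := ∀ (block : List String), Dom_strFromBlock block → Pre_strFromBlock block → Spec_strFromBlock block (strFromBlock block)

-- ===== LEMMAS AND PROOFS =====

lemma lcp2_prefix_left : ∀ a b : List Char, lcp2 a b <+: a := by
  intro a
  induction a with
  | nil => intro b; cases b <;> simp [lcp2]
  | cons x as ih =>
    intro b
    cases b with
    | nil => simp [lcp2]
    | cons y bs =>
      simp only [lcp2]
      split
      · exact List.cons_prefix_cons.mpr ⟨rfl, ih bs⟩
      · simp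

lemma lcp2_prefix_right : ∀ a b : List Char, lcp2 a b <+: b := by
  intro a
  induction a with
  | nil => intro b; cases b <;> simp [lcp2]
  | cons x as ih =>
    intro b
    cases b with
    | nil => simp [lcp2]
    | cons y bs =>
      simp only [lcp2]
      split
      · rename_i h; subst h; exact List.cons_prefix_cons.mpr ⟨rfl, ih bs⟩
      · simp

lemma lcp2_max : ∀ a b : List Char, (lcp2 a b).length < a.length →
    (lcp2 a b).length < b.length → a[(lcp2 a b).length]? = b[(lcp2 a b).length]? → False := by
  intro a
  induction a with
  | nil => intro b; simp
  | cons x as ih =>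
    intro b
    cases b with
    | nil => simp
    | cons y bs =>
      simp only [lcp2]
      split
      · intro ha hb hg
        simp only [List.length_cons, List.getElem?_cons_succ] at ha hb hg
        exact ih bs (by omega) (by omega) hg
      · intro _ _ hg
        simp_all

-- getElem? through a prefix
lemma prefix_getElem? {l₁ l₂ : List Char} (h : l₁ <+: l₂) {k : Nat} (hk : k < l₁.length) :
    l₂[k]? = l₁[k]? := by
  obtain ⟨r, rfl⟩ := h
  exact List.getElem?_append_left hk

lemma foldl_lcp_prefix_acc : ∀ (ts : List (List Char)) (acc : List Char),
    ts.foldl lcp2 acc <+: acc := by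
  intro ts
  induction ts with
  | nil => intro acc; simp
  | cons t ts ih =>
    intro acc
    exact (ih (lcp2 acc t)).trans (lcp2_prefix_left acc t)

lemma foldl_lcp_prefix_mem : ∀ (ts : List (List Char)) (acc t : List Char), t ∈ ts →
    ts.foldl lcp2 acc <+: t := by
  intro ts
  induction ts with
  | nil => intro acc t h; simp at h
  | cons t₀ ts ih =>
    intro acc t h
    rcases List.mem_cons.mp h with rfl | h
    · exact (foldl_lcp_prefix_acc ts (lcp2 acc t)).trans (lcp2_prefix_right acc t)
    · exact ih (lcp2 acc t₀) t h

lemma foldl_lcp_get : ∀ (ts : List (List Char)) (acc : List Char) (k : Nat),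
    k < (ts.foldl lcp2 acc).length → ∀ t ∈ ts, t[k]? = acc[k]? := by
  intro ts
  induction ts with
  | nil => intro acc k _ t h; simp at h
  | cons t₀ ts ih =>
    intro acc k hk t ht
    have hlen : (List.foldl lcp2 (lcp2 acc t₀) ts).length ≤ (lcp2 acc t₀).length :=
      (foldl_lcp_prefix_acc ts (lcp2 acc t₀)).length_le
    have hk' : k < (lcp2 acc t₀).length := lt_of_lt_of_le hk hlen
    have hacc : acc[k]? = (lcp2 acc t₀)[k]? := prefix_getElem? (lcp2_prefix_left acc t₀) hk'
    have ht₀ : t₀[k]? = (lcp2 acc t₀)[k]? := prefix_getElem? (lcp2_prefix_right acc t₀) hk'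
    rcases List.mem_cons.mp ht with rfl | ht
    · rw [ht₀, hacc]
    · rw [ih (lcp2 acc t₀) k hk t ht, hacc]

lemma foldl_lcp_max : ∀ (ts : List (List Char)) (acc : List Char),
    (ts.foldl lcp2 acc).length < acc.length →
    (∀ t ∈ ts, (ts.foldl lcp2 acc).length < t.length ∧
      t[(ts.foldl lcp2 acc).length]? = acc[(ts.foldl lcp2 acc).length]?) → False := by
  intro ts
  induction ts with
  | nil => intro acc h _; simp at h
  | cons t₀ ts ih =>
    intro acc h hall
    simp only [List.foldl_cons] at h hall ⊢
    set N := (List.foldl lcp2 (lcp2 acc t₀) ts).length with hN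
    have ht₀ := hall t₀ (List.mem_cons_self ..)
    have hle : N ≤ (lcp2 acc t₀).length :=
      (foldl_lcp_prefix_acc ts (lcp2 acc t₀)).length_le
    rcases lt_or_eq_of_le hle with hlt | heq
    · apply ih (lcp2 acc t₀) hlt
      intro t ht
      have := hall t (List.mem_cons_of_mem _ ht)
      refine ⟨this.1, ?_⟩
      rw [this.2, prefix_getElem? (lcp2_prefix_left acc t₀) hlt]
    · exact lcp2_max acc t₀ (heq ▸ h) (heq ▸ ht₀.1) (by rw [← heq]; exact ht₀.2.symm)

lemma strA_loop_eq (terms : List (List Char)) (f : List Char) (N m : Nat)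
    (hagree : ∀ k, k < N → ∀ t ∈ terms, t[k]? = f[k]?)
    (hstop : N < m → ¬ (∀ t ∈ terms, t[N]? = f[N]?))
    (hNm : N ≤ m) :
    ∀ fuel i, i + fuel = m → i ≤ N → strA_loop terms f fuel i ((i : Int) - 1) = (N : Int) - 1 := by
  intro fuel
  induction fuel with
  | zero =>
    intro i hi hiN
    have : i = N := by omega
    simp [strA_loop, this]
  | succ fuel ih =>
    intro i hi hiN
    rcases lt_or_eq_of_le hiN with hlt | rfl
    · have hcond : terms.all (fun t => t[i]? == f[i]?) = true := by
        simp only [List.all_eq_true, beq_iff_eq]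
        exact fun t ht => hagree i hlt t ht
      simp only [strA_loop, hcond, if_true]
      have : ((i : Int)) = ((i + 1 : Nat) : Int) - 1 := by push_cast; ring
      rw [this]
      exact ih (i + 1) (by omega) (by omega)
    · have hcond : terms.all (fun t => t[i]? == f[i]?) = false := by
        apply List.all_eq_false.mpr
        have hne := hstop (by omega)
        push Not at hne
        obtain ⟨t, ht, hne⟩ := hne
        exact ⟨t, ht, by simpa using hne⟩
      simp [strA_loop, hcond]

-- A's suffix foldl as res ++ flatten (map …)
lemma foldl_suffix (terms : List (List Char)) (g : List Char → List Char) (res : List Char) :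
    terms.foldl (fun r t => r ++ g t) res = res ++ (terms.map g).flatten := by
  rw [PySem.List.foldl_append_eq_flatMap]
  simp [List.flatMap_def]

-- ===== VERDICT (by name: the statement is the Claim_ definition above) =====
theorem strFromBlock_spec : Claim_equal_strFromBlock := by
  intro block _ hpre
  unfold Spec_strFromBlock strFromBlock strFromBlock_alt
  match block with
  | [] => exact absurd rfl hpre
  | f :: bs =>
    simp only []
    set terms := (f :: bs).map String.toList with hterms
    set pre := terms.foldl lcp2 f.toList with hpreDef
    set N := pre.length with hNdef
    -- min? is some
    rcases hmin : PySem.List.min? (terms.map (fun t => ((t.length : Int)))) (fun x => x) with _ | M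
    · exfalso
      rw [PySem.List.min?_eq_none_iff] at hmin
      simp [hterms] at hmin
    have hMmem := PySem.List.min?_mem hmin
    have hMmin := PySem.List.min?_isMin hmin
    obtain ⟨t₀, ht₀, hMeq⟩ := List.mem_map.mp hMmem
    have hM0 : 0 ≤ M := by rw [← hMeq]; positivity
    set m := M.toNat with hm
    have hmt₀ : m = t₀.length := by omega
    have hminle : ∀ t ∈ terms, m ≤ t.length := by
      intro t ht
      have := hMmin ((t.length : Int)) (List.mem_map_of_mem ht)
      omega
    have hfmem : f.toList ∈ terms := by
      rw [hterms]; exact List.mem_map_of_mem (List.mem_cons_self ..)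
    have hmf : m ≤ f.toList.length := hminle _ hfmem
    have hpref : pre <+: f.toList := foldl_lcp_prefix_acc terms f.toList
    have hNN : (List.foldl lcp2 f.toList terms).length = N := by rw [hNdef, hpreDef]
    have hhead' : terms.headD [] = f.toList := by rw [hterms]; rfl
    have hNf : N ≤ f.toList.length := hpref.length_le
    have hNm : N ≤ m := by
      have := (foldl_lcp_prefix_mem terms f.toList t₀ ht₀).length_le
      omega
    have hci : strA_loop terms f.toList m 0 (-1) = (N : Int) - 1 := by
      have hstop : N < m → ¬ (∀ t ∈ terms, t[N]? = f.toList[N]?) := by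
        intro hNm' hall
        apply foldl_lcp_max terms f.toList
        · omega
        · intro t ht
          rw [hNN]
          exact ⟨by have := hminle t ht; omega, hall t ht⟩
      have := strA_loop_eq terms f.toList N m
        (fun k hk t ht => foldl_lcp_get terms f.toList k hk t ht)
        hstop hNm m 0 (by omega) (by omega)
      simpa using this
    simp only [hmin, ← hm, hhead', hci]
    have h1 : ((N : Int) - 1 + 1) = (N : Int) := by ring
    rw [h1, Int.toNat_natCast]
    have htake : f.toList.take N = pre := (List.prefix_iff_eq_take.mp hpref).symm
    rw [htake]
    simp only [List.append_assoc]
    rw [foldl_suffix]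
    by_cases hN0 : N = 0
    · simp [hN0]
    · have hneq : (N : Int) - 1 ≠ -1 := by omega
      simp [hNdef]
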